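-- pv_equiv track=rewrite | github.com/KarisaAdvynia/Advynia | AdvGame/SMA3/ObjectFunctions/Shared.py | gen_rectindex
-- ===== SOURCE A (Python) =====
-- def gen_rectindex(a, b):
--     """Generate indexes from 0 to 8, used to determine the corner/edge/center
--     tiles of a rectangle with dimensions a,b."""
--     if a == 0:
--         yield 0
--         if b != 0:
--             for i in range(b-1):
--                 yield 3
--             yield 6
--     else:
--         # first edge
--         yield 0
--         for i in range(a-1):
--             yield 1
--         yield 2
--         if b != 0:
--             # central lines
--             for i in range(b-1):
--                 yield 3
--                 for i in range(a-1):
--                     yield 4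
--                 yield 5
--             # last edge
--             yield 6
--             for i in range(a-1):
--                 yield 7
--             yield 8
-- ===== SOURCE B (Python) =====
-- def gen_rectindex(a, b):
--     """Generate indexes from 0 to 8, used to determine the corner/edge/center
--     tiles of a rectangle with dimensions a,b."""
--     row_bases = [0] if b == 0 else [0] + [3] * (b - 1) + [6]
--     col_offsets = [0] if a == 0 else [0] + [1] * (a - 1) + [2]
--     for base in row_bases:
--         for off in col_offsets:
--             yield base + off
-- ===== Notes on version B (the rewrite author's own statement) =====
-- stated objective: simpler
-- what changed: Replaces the nested conditional emission (separate code paths for first edge, central lines, last edge) with a Cartesian product of two precomputed tables, row bases and column offsets, yielding base+offset in a single uniform double loop.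
import Mathlib
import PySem

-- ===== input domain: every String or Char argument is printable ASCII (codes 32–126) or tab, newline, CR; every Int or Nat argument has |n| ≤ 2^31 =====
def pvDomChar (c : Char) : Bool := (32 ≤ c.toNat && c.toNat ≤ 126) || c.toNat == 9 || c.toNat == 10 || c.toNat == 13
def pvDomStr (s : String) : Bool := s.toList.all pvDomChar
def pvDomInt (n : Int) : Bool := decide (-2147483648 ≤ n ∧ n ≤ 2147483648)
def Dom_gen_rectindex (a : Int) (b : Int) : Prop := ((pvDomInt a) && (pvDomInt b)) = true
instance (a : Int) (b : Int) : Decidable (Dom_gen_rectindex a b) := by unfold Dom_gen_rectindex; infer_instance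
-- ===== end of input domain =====

-- B replaces A's three hand-written conditional emission phases by a Cartesian product
-- of two precomputed tables (row bases x column offsets); objective: simpler.

-- ===== PORT A =====
-- literal transliteration of the generator: each 'for i in range(n): yield c'
-- is the constant map over PySem.List.pyRange 0 n 1, concatenated in emission order
def gen_rectindex (a : Int) (b : Int) : List Int :=
  if a == 0 then
    [0] ++
      (if b != 0 then (PySem.List.pyRange 0 (b-1) 1).map (fun _ => (3:Int)) ++ [6] else [])
  else
    [0] ++ (PySem.List.pyRange 0 (a-1) 1).map (fun _ => (1:Int)) ++ [2] ++
      (if b != 0 then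
        (PySem.List.pyRange 0 (b-1) 1).flatMap
          (fun _ => [3] ++ (PySem.List.pyRange 0 (a-1) 1).map (fun _ => (4:Int)) ++ [5]) ++
        ([6] ++ (PySem.List.pyRange 0 (a-1) 1).map (fun _ => (7:Int)) ++ [8])
      else [])

-- ===== PORT B =====
-- '[c] * n' for an Int n is List.replicate n.toNat c (empty for negative n, as in Python)
def gen_rectindex_alt (a : Int) (b : Int) : List Int :=
  let row_bases : List Int := if b == 0 then [0] else [0] ++ List.replicate (b-1).toNat 3 ++ [6]
  let col_offsets : List Int := if a == 0 then [0] else [0] ++ List.replicate (a-1).toNat 1 ++ [2]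
  row_bases.flatMap (fun base => col_offsets.map (fun off => base + off))

-- ===== PRECONDITION & SPEC =====
def Spec_gen_rectindex (a : Int) (b : Int) (out : List Int) : Prop := out = gen_rectindex_alt a b
instance (a : Int) (b : Int) (out : List Int) : Decidable (Spec_gen_rectindex a b out) := by unfold Spec_gen_rectindex; infer_instance

-- ===== CLAIM (what is proved, stated in full; the proofs are below) =====
def Claim_equal_gen_rectindex : Prop := ∀ (a : Int) (b : Int), Dom_gen_rectindex a b → Spec_gen_rectindex a b (gen_rectindex a b)

-- ===== LEMMAS AND PROOFS =====

theorem pv_flatMap_replicate {α β : Type} (n : Nat) (x : α) (f : α → List β) :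
    (List.replicate n x).flatMap f = (List.replicate n (f x)).flatten := by
  induction n with
  | zero => simp
  | succ k ih => simp [List.replicate_succ, List.flatMap_cons, ih]

theorem pv_flatMap_const_pyRange (n : Int) (L : List Int) :
    List.flatMap (fun _ => L) (PySem.List.pyRange 0 n 1) = (List.replicate n.toNat L).flatten := by
  rw [List.flatMap_def, List.map_const', PySem.List.length_pyRange_one]
  simp

theorem gen_rectindex_spec : Claim_equal_gen_rectindex := by
  intro a b _
  show gen_rectindex a b = gen_rectindex_alt a b
  unfold gen_rectindex gen_rectindex_alt
  by_cases ha : a = 0 <;> by_cases hb : b = 0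
  · simp [ha, hb]
  · simp [ha, hb]
  · simp [ha, hb]
  · -- a ≠ 0, b ≠ 0: both sides reduce to (b-1).toNat copies of the central line
    simp [ha, hb]
    rw [pv_flatMap_const_pyRange, pv_flatMap_replicate,
      show (b - 1).toNat = b.toNat - 1 from by omega]
    norm_num
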